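-- pv_equiv track=rewrite | github.com/jerry-fuyi/SerialAccessor | jupyter/seracc.py | mask_shl
-- ===== SOURCE A (Python) =====
-- def mask_shl(value, mask):
--     result = 0
--     j = 0
--     for i in range(32):
--         if mask & (1 << i):
--             if value & (1 << j):
--                 result |= 1 << i
--             j += 1
--     return result
-- ===== SOURCE B (Python) =====
-- def mask_shl(value, mask):
--     def go(v, m, n):
--         if n == 0:
--             return 0
--         if m & 1:
--             return (v & 1) | (go(v >> 1, m >> 1, n - 1) << 1)
--         return go(v, m >> 1, n - 1) << 1
--     return go(value, mask, 32)
-- ===== Notes on version B (the rewrite author's own statement) =====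
-- stated objective: alternative
-- what changed: Replaces A's iterative 32-step indexed scan (maintaining a separate deposit counter j and building the result with 1<<i ORs) by a recursive shift-based deposit: the recursion shifts value and mask right one bit per step (value only on set mask bits, so no j counter exists) and assembles the result back-to-front with (v&1) | (rec << 1).
import Mathlib
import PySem

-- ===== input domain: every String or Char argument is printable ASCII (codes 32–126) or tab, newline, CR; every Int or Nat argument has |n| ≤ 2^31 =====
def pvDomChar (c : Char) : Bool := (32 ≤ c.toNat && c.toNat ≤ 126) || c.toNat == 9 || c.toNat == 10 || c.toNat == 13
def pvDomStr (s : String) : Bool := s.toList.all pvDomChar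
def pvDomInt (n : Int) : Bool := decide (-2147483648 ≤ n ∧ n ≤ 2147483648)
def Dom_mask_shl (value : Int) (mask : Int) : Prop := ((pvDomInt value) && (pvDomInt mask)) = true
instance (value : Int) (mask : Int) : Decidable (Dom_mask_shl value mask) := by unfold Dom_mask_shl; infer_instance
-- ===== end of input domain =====

-- B replaces A's 32-step indexed scan with its j counter by a recursive shift-based bit
-- deposit (alternative decomposition, same cost; return values proved equal on all inputs).

-- ===== PORT A =====
-- loop body of A's 'for i in range(32)': state (result, j)
def maskShlStepA (value : Int) (mask : Int) (s : Int × Int) (i : Int) : Int × Int :=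
  if PySem.Int.band mask ((1 : Int) <<< i.toNat) ≠ 0 then
    (if PySem.Int.band value ((1 : Int) <<< s.2.toNat) ≠ 0 then
      (PySem.Int.bor s.1 ((1 : Int) <<< i.toNat), s.2 + 1)
    else (s.1, s.2 + 1))
  else s

def mask_shl (value : Int) (mask : Int) : Int :=
  (List.foldl (maskShlStepA value mask) (0, 0) (PySem.List.pyRange 0 32)).1

-- ===== PORT B =====
-- B's inner 'def go(v, m, n)'
def maskShlGoB (v : Int) (m : Int) : Nat → Int
  | 0 => 0
  | n + 1 =>
    if PySem.Int.band m 1 ≠ 0 then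
      PySem.Int.bor (PySem.Int.band v 1) (maskShlGoB (v >>> (1 : Nat)) (m >>> (1 : Nat)) n <<< (1 : Nat))
    else
      maskShlGoB v (m >>> (1 : Nat)) n <<< (1 : Nat)

def mask_shl_alt (value : Int) (mask : Int) : Int :=
  maskShlGoB value mask 32

-- ===== PRECONDITION & SPEC =====
def Spec_mask_shl (value : Int) (mask : Int) (out : Int) : Prop := out = mask_shl_alt value mask
instance (value : Int) (mask : Int) (out : Int) : Decidable (Spec_mask_shl value mask out) := by unfold Spec_mask_shl; infer_instance

-- ===== CLAIM (what is proved, stated in full; the proofs are below) =====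
def Claim_equal_mask_shl : Prop := ∀ (value : Int) (mask : Int), Dom_mask_shl value mask → Spec_mask_shl value mask (mask_shl value mask)

-- ===== LEMMAS AND PROOFS =====

-- 1 <<< k over Int is the cast of the Nat power of two
lemma one_shl_eq_natCast (k : Nat) : (1 : Int) <<< k = ((1 <<< k : Nat) : Int) := rfl

lemma natCast_shl (t s : Nat) : ((t : Int) <<< s) = ((t <<< s : Nat) : Int) := rfl

lemma shl_nonneg {a : Int} (h : 0 ≤ a) (k : Nat) : 0 ≤ a <<< k := by
  obtain ⟨m, rfl⟩ := Int.eq_ofNat_of_zero_le h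
  rw [natCast_shl]
  exact Int.natCast_nonneg _

-- bit k of x, tested A's way (x & (1 << k)), equals bit 0 of x >> k, tested B's way (x & 1)
lemma band_pow_ne_zero_iff (x : Int) (k : Nat) :
    PySem.Int.band x ((1 : Int) <<< k) ≠ 0 ↔ PySem.Int.band (x >>> k) 1 ≠ 0 := by
  cases x with
  | ofNat m =>
    show PySem.Int.band (m : Int) ((1 : Int) <<< k) ≠ 0 ↔
      PySem.Int.band ((m >>> k : Nat) : Int) 1 ≠ 0
    rw [one_shl_eq_natCast, PySem.Int.band_natCast,
      (by norm_num : (1 : Int) = ((1 : Nat) : Int)), PySem.Int.band_natCast]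
    have h1 : m &&& 1 <<< k = (m.testBit k).toNat * 2 ^ k := by
      rw [Nat.shiftLeft_eq, one_mul, Nat.and_two_pow]
    have h2 : (m >>> k) &&& 1 = ((m >>> k).testBit 0).toNat * 1 := by
      simpa using Nat.and_two_pow (m >>> k) 0
    rw [h1, h2, Nat.testBit_shiftRight]
    simp only [ne_eq, Int.natCast_eq_zero]
    cases m.testBit (k + 0) <;> simp
  | negSucc m =>
    have hs : (Int.negSucc m) >>> k = Int.negSucc (m >>> k) := rfl
    rw [hs, one_shl_eq_natCast]
    have hneg : ¬ (0 : Int) ≤ Int.negSucc m := of_decide_eq_false rfl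
    have hneg2 : ¬ (0 : Int) ≤ Int.negSucc (m >>> k) := of_decide_eq_false rfl
    have h01 : (0 : Int) ≤ ((1 <<< k : Nat) : Int) := Int.natCast_nonneg _
    have h02 : (0 : Int) ≤ 1 := by norm_num
    have e1 : -(Int.negSucc m) - 1 = (m : Int) := by rw [Int.negSucc_eq]; ring
    have e2 : -(Int.negSucc (m >>> k)) - 1 = ((m >>> k : Nat) : Int) := by
      rw [Int.negSucc_eq]; ring
    rw [PySem.Int.band, PySem.Int.band, if_neg hneg, if_neg hneg2, if_pos h01, if_pos h02,
      e1, e2]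
    simp only [Int.toNat_natCast, Int.toNat_one]
    have h1 : (1 <<< k : Nat) &&& m = 2 ^ k * (m.testBit k).toNat := by
      rw [Nat.shiftLeft_eq, one_mul, Nat.two_pow_and]
    have h2 : 1 &&& (m >>> k) = 2 ^ 0 * ((m >>> k).testBit 0).toNat := by
      simpa using Nat.two_pow_and (m >>> k) 0
    rw [h1, h2, Nat.testBit_shiftRight, Nat.shiftLeft_eq, one_mul]
    simp only [ne_eq, Int.natCast_eq_zero]
    cases m.testBit (k + 0) <;> simp

-- x & 1 is 0 or 1
lemma band_one_cases (x : Int) : PySem.Int.band x 1 = 0 ∨ PySem.Int.band x 1 = 1 := by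
  rw [PySem.Int.band_one]
  have h1 := PySem.Int.mod_nonneg x (b := 2) (by norm_num)
  have h2 := PySem.Int.mod_lt x (b := 2) (by norm_num)
  omega

lemma band_one_nonneg (x : Int) : 0 ≤ PySem.Int.band x 1 := by
  rcases band_one_cases x with h | h <;> omega

lemma bor_nonneg {a b : Int} (ha : 0 ≤ a) (hb : 0 ≤ b) : 0 ≤ PySem.Int.bor a b := by
  rw [PySem.Int.bor_of_nonneg ha hb]
  exact Int.natCast_nonneg _

lemma goB_nonneg (n : Nat) : ∀ (v m : Int), 0 ≤ maskShlGoB v m n := by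
  induction n with
  | zero => intro v m; exact le_refl 0
  | succ n ih =>
    intro v m
    rw [maskShlGoB]
    split
    · exact bor_nonneg (band_one_nonneg v) (shl_nonneg (ih (v >>> (1 : Nat)) (m >>> (1 : Nat))) 1)
    · exact shl_nonneg (ih v (m >>> (1 : Nat))) 1

lemma nat_shl_or (x y k : Nat) : (x ||| y) <<< k = (x <<< k) ||| (y <<< k) :=
  Nat.eq_of_testBit_eq fun i => by
    simp [Nat.testBit_shiftLeft, Nat.testBit_or, Bool.and_or_distrib_left]

-- shiftLeft distributes over bor on nonnegatives
lemma bor_shl {a b : Int} (ha : 0 ≤ a) (hb : 0 ≤ b) (k : Nat) :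
    (PySem.Int.bor a b) <<< k = PySem.Int.bor (a <<< k) (b <<< k) := by
  obtain ⟨x, rfl⟩ := Int.eq_ofNat_of_zero_le ha
  obtain ⟨y, rfl⟩ := Int.eq_ofNat_of_zero_le hb
  rw [natCast_shl, natCast_shl, PySem.Int.bor_natCast, PySem.Int.bor_natCast,
    natCast_shl, nat_shl_or]

lemma bor_assoc_nonneg {a b c : Int} (ha : 0 ≤ a) (hb : 0 ≤ b) (hc : 0 ≤ c) :
    PySem.Int.bor (PySem.Int.bor a b) c = PySem.Int.bor a (PySem.Int.bor b c) := by
  rw [PySem.Int.bor_of_nonneg (bor_nonneg ha hb) hc, PySem.Int.bor_of_nonneg ha (bor_nonneg hb hc),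
    PySem.Int.bor_of_nonneg ha hb, PySem.Int.bor_of_nonneg hb hc]
  simp [Nat.or_assoc]

lemma bor_zero_left {a : Int} : PySem.Int.bor 0 a = a := by
  rw [PySem.Int.bor_comm, PySem.Int.bor_zero]

-- number of set mask bits consumed (A's final j), used only to carry the fold's state
def maskShlJ (m : Int) : Nat → Nat
  | 0 => 0
  | n + 1 => (if PySem.Int.band m 1 ≠ 0 then 1 else 0) + maskShlJ (m >>> (1 : Nat)) n

-- the invariant: A's fold over positions off..off+n-1 started at (r, jn) computes
-- r | ((go (value >> jn) (mask >> off) n) << off)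
lemma key (value mask : Int) : ∀ (n off jn : Nat) (r : Int), 0 ≤ r →
    List.foldl (maskShlStepA value mask) (r, (jn : Int))
      ((List.range n).map (fun k => ((k + off : Nat) : Int)))
    = (PySem.Int.bor r (maskShlGoB (value >>> jn) (mask >>> off) n <<< off),
       ((jn + maskShlJ (mask >>> off) n : Nat) : Int)) := by
  intro n
  induction n with
  | zero =>
    intro off jn r hr
    simp [maskShlGoB, maskShlJ, PySem.Int.bor_zero]
  | succ n ih =>
    intro off jn r hr
    rw [List.range_succ_eq_map, List.map_cons, List.map_map, List.foldl_cons]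
    have hmap : (List.range n).map ((fun k => ((k + off : Nat) : Int)) ∘ Nat.succ)
        = (List.range n).map (fun k => ((k + (off + 1) : Nat) : Int)) := by
      apply List.map_congr_left
      intro k _
      show ((k.succ + off : Nat) : Int) = ((k + (off + 1) : Nat) : Int)
      congr 1
      omega
    rw [hmap]
    simp only [maskShlStepA, Int.toNat_natCast, Nat.zero_add]
    have hgo : 0 ≤ maskShlGoB (value >>> (jn + 1)) (mask >>> (off + 1)) n := goB_nonneg n _ _
    have hsv : value >>> jn >>> (1 : Nat) = value >>> (jn + 1) := (Int.shiftRight_add value jn 1).symm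
    have hsm : mask >>> off >>> (1 : Nat) = mask >>> (off + 1) := (Int.shiftRight_add mask off 1).symm
    by_cases hm : PySem.Int.band mask ((1 : Int) <<< off) ≠ 0
    · rw [if_pos hm]
      have hm' : PySem.Int.band (mask >>> off) 1 ≠ 0 := (band_pow_ne_zero_iff mask off).mp hm
      by_cases hv : PySem.Int.band value ((1 : Int) <<< jn) ≠ 0
      · rw [if_pos hv]
        have hv' : PySem.Int.band (value >>> jn) 1 = 1 := by
          rcases band_one_cases (value >>> jn) with h | h
          · exact absurd h ((band_pow_ne_zero_iff value jn).mp hv)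
          · exact h
        have hone : 0 ≤ (1 : Int) <<< off := shl_nonneg (by norm_num) off
        have hr' : 0 ≤ PySem.Int.bor r ((1 : Int) <<< off) := bor_nonneg hr hone
        rw [(by push_cast; ring : ((jn : Int) + 1) = (((jn + 1 : Nat)) : Int)),
          ih (off + 1) (jn + 1) _ hr']
        refine Prod.ext ?_ ?_
        · show PySem.Int.bor (PySem.Int.bor r ((1 : Int) <<< off))
              (maskShlGoB (value >>> (jn + 1)) (mask >>> (off + 1)) n <<< (off + 1))
            = PySem.Int.bor r (maskShlGoB (value >>> jn) (mask >>> off) (n + 1) <<< off)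
          rw [maskShlGoB, if_pos hm', hv', hsv, hsm,
            bor_shl (by norm_num) (shl_nonneg hgo 1) off,
            ← Int.shiftLeft_add _ 1 off, Nat.add_comm 1 off]
          exact bor_assoc_nonneg hr hone (shl_nonneg hgo (off + 1))
        · show (((jn + 1) + maskShlJ (mask >>> (off + 1)) n : Nat) : Int)
            = ((jn + maskShlJ (mask >>> off) (n + 1) : Nat) : Int)
          rw [maskShlJ, if_pos hm', hsm]
          push_cast
          ring
      · rw [if_neg hv]
        have hv' : PySem.Int.band (value >>> jn) 1 = 0 := by
          rcases band_one_cases (value >>> jn) with h | h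
          · exact h
          · exact absurd ((band_pow_ne_zero_iff value jn).mpr (by omega)) hv
        rw [(by push_cast; ring : ((jn : Int) + 1) = (((jn + 1 : Nat)) : Int)),
          ih (off + 1) (jn + 1) r hr]
        refine Prod.ext ?_ ?_
        · show PySem.Int.bor r (maskShlGoB (value >>> (jn + 1)) (mask >>> (off + 1)) n <<< (off + 1))
            = PySem.Int.bor r (maskShlGoB (value >>> jn) (mask >>> off) (n + 1) <<< off)
          rw [maskShlGoB, if_pos hm', hv', bor_zero_left, hsv, hsm,
            ← Int.shiftLeft_add _ 1 off, Nat.add_comm 1 off]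
        · show (((jn + 1) + maskShlJ (mask >>> (off + 1)) n : Nat) : Int)
            = ((jn + maskShlJ (mask >>> off) (n + 1) : Nat) : Int)
          rw [maskShlJ, if_pos hm', hsm]
          push_cast
          ring
    · rw [if_neg hm]
      have hm' : ¬ PySem.Int.band (mask >>> off) 1 ≠ 0 := fun h =>
        hm ((band_pow_ne_zero_iff mask off).mpr h)
      rw [ih (off + 1) jn r hr]
      refine Prod.ext ?_ ?_
      · show PySem.Int.bor r (maskShlGoB (value >>> jn) (mask >>> (off + 1)) n <<< (off + 1))
          = PySem.Int.bor r (maskShlGoB (value >>> jn) (mask >>> off) (n + 1) <<< off)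
        rw [maskShlGoB, if_neg hm', hsm, ← Int.shiftLeft_add _ 1 off, Nat.add_comm 1 off]
      · show ((jn + maskShlJ (mask >>> (off + 1)) n : Nat) : Int)
          = ((jn + maskShlJ (mask >>> off) (n + 1) : Nat) : Int)
        rw [maskShlJ, if_neg hm', hsm]
        push_cast
        ring

-- ===== VERDICT (by name: the statement is the Claim_ definition above) =====
theorem mask_shl_spec : Claim_equal_mask_shl := by
  intro value mask _
  show mask_shl value mask = mask_shl_alt value mask
  rw [mask_shl, (by norm_num : (32 : Int) = ((32 : Nat) : Int)),
    PySem.List.pyRange_zero_natCast]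
  have hk := key value mask 32 0 0 0 le_rfl
  simp only [Nat.add_zero, Nat.cast_zero] at hk
  rw [hk, bor_zero_left, Int.shiftLeft_zero, Int.shiftRight_zero, Int.shiftRight_zero]
  rfl
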